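-- pv_equiv track=rewrite | github.com/peng6662001/scripts | parse_spec2017.py | resortArray
-- ===== SOURCE A (Python) =====
-- def resortArray(array):
--     file_array = []
--     keys = ['host_', 'qemu_', 'clh_']
--     for key in keys:
--         for file in array:
--             if key in file:
--                 file_array.append(file)
--     return file_array
-- ===== SOURCE B (Python) =====
-- def resortArray(array):
--     keys = ['host_', 'qemu_', 'clh_']
--     buckets = {key: [] for key in keys}
--     for file in array:
--         for key in keys:
--             if key in file:
--                 buckets[key].append(file)
--     return buckets['host_'] + buckets['qemu_'] + buckets['clh_']
-- ===== Notes on version B (the rewrite author's own statement) =====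
-- stated objective: alternative
-- what changed: Replaces A's three full scans of the input (one per key) by a single pass that drops each file into per-key buckets, then concatenates the buckets in the fixed key order.
import Mathlib
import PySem

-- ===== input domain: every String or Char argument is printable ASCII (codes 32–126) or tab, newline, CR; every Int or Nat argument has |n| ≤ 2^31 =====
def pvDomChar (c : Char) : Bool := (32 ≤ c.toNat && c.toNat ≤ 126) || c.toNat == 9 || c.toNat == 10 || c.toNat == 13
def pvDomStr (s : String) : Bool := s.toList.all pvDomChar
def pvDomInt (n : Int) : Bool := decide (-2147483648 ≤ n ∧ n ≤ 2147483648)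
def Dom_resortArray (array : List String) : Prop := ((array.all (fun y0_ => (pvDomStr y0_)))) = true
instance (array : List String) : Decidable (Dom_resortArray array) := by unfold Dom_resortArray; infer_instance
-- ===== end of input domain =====

-- B makes one pass over the input with per-key buckets instead of A's three full scans; same output order.

-- ===== PORT A =====
-- A: for key in keys: for file in array: if key in file: file_array.append(file)
def resortArray (array : List String) : List String :=
  (["host_", "qemu_", "clh_"] : List String).foldl
    (fun file_array key =>
      array.foldl
        (fun file_array file =>
          if PySem.Str.isIn key file then file_array ++ [file] else file_array)
        file_array)
    []

-- ===== PORT B =====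
-- B: one pass over array, appending each file to every matching bucket; then concatenate buckets in key order.
def resortArray_alt (array : List String) : List String :=
  let buckets :=
    array.foldl
      (fun (b : List String × List String × List String) file =>
        (if PySem.Str.isIn "host_" file then b.1 ++ [file] else b.1,
         if PySem.Str.isIn "qemu_" file then b.2.1 ++ [file] else b.2.1,
         if PySem.Str.isIn "clh_" file then b.2.2 ++ [file] else b.2.2))
      ([], [], [])
  buckets.1 ++ buckets.2.1 ++ buckets.2.2

-- ===== PRECONDITION & SPEC =====
def Spec_resortArray (array : List String) (out : List String) : Prop := out = resortArray_alt array
instance (array : List String) (out : List String) : Decidable (Spec_resortArray array out) := by unfold Spec_resortArray; infer_instance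

-- ===== CLAIM (what is proved, stated in full; the proofs are below) =====
def Claim_equal_resortArray : Prop := ∀ (array : List String), Dom_resortArray array → Spec_resortArray array (resortArray array)

-- ===== LEMMAS AND PROOFS =====

-- B's single-pass loop keeps each bucket equal to 'previous contents ++ matching files so far'.
theorem alt_loop (array h q c : List String) :
    array.foldl
      (fun (b : List String × List String × List String) file =>
        (if PySem.Str.isIn "host_" file then b.1 ++ [file] else b.1,
         if PySem.Str.isIn "qemu_" file then b.2.1 ++ [file] else b.2.1,
         if PySem.Str.isIn "clh_" file then b.2.2 ++ [file] else b.2.2))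
      (h, q, c)
    = (h ++ array.filter (fun f => PySem.Str.isIn "host_" f),
       q ++ array.filter (fun f => PySem.Str.isIn "qemu_" f),
       c ++ array.filter (fun f => PySem.Str.isIn "clh_" f)) := by
  induction array generalizing h q c with
  | nil => simp
  | cons x t ih =>
      simp only [List.foldl_cons, List.filter_cons, ih]
      split_ifs <;> simp

-- ===== VERDICT (by name: the statement is the Claim_ definition above) =====
theorem resortArray_spec : Claim_equal_resortArray := by
  intro array _
  unfold Spec_resortArray resortArray resortArray_alt
  simp only [List.foldl_cons, List.foldl_nil,
    PySem.List.foldl_append_if_eq_filter, alt_loop]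
  rfl
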